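-- pv_equiv track=rewrite | github.com/Ewingsal/astrbot_plugin_group_digest | services/message_filters.py | is_plugin_command_message
-- ===== SOURCE A (Python) =====
-- PLUGIN_COMMANDS = (
--     "/group_digest",
--     "/group_digest_today",
--     "/group_digest_debug_today",
-- )
--
-- def is_plugin_command_message(text: str) -> bool:
--     if not text:
--         return False
--
--     normalized = text.strip()
--     if not normalized:
--         return False
--
--     normalized = _strip_leading_mentions(normalized)
--     if not normalized:
--         return False
--
--     for command in PLUGIN_COMMANDS:
--         if normalized == command:
--             return True
--         if normalized.startswith(command):
--             suffix = normalized[len(command) : len(command) + 1]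
--             if suffix in {"", " ", "\n", "\t", "\r", "@"}:
--                 return True
--     return False
--
-- def _strip_leading_mentions(text: str) -> str:
--     current = text.lstrip()
--
--     while current:
--         if current.startswith("[CQ:at") and "]" in current:
--             current = current.split("]", 1)[1].lstrip()
--             continue
--
--         if current.startswith("@"):
--             parts = current.split(maxsplit=1)
--             if len(parts) == 1:
--                 return ""
--             current = parts[1].lstrip()
--             continue
--
--         break
--
--     return current
-- ===== SOURCE B (Python) =====
-- PLUGIN_COMMANDS = (
--     "/group_digest",
--     "/group_digest_today",
--     "/group_digest_debug_today",
-- )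
--
-- _DELIMITERS = " \t\n\r@"
-- _COMMAND_SET = frozenset(PLUGIN_COMMANDS)
--
--
-- def is_plugin_command_message(text: str) -> bool:
--     normalized = _strip_leading_mentions(text.strip())
--     return _leading_token(normalized) in _COMMAND_SET
--
--
-- def _leading_token(s: str) -> str:
--     for i, ch in enumerate(s):
--         if ch in _DELIMITERS:
--             return s[:i]
--     return s
--
--
-- def _strip_leading_mentions(text: str) -> str:
--     current = text.lstrip()
--
--     while current:
--         if current.startswith("[CQ:at") and "]" in current:
--             current = current.split("]", 1)[1].lstrip()
--             continue
--
--         if current.startswith("@"):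
--             parts = current.split(maxsplit=1)
--             if len(parts) == 1:
--                 return ""
--             current = parts[1].lstrip()
--             continue
--
--         break
--
--     return current
-- ===== Notes on version B (the rewrite author's own statement) =====
-- stated objective: simpler
-- what changed: The per-command loop of equality test, startswith and boundary-suffix slice check is replaced by extracting the maximal leading token before the first delimiter character (space, tab, newline, carriage return, or at-sign) in one scan and testing membership in a frozenset of the commands; the three empty-string early returns collapse into that single membership test.
import Mathlib
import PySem

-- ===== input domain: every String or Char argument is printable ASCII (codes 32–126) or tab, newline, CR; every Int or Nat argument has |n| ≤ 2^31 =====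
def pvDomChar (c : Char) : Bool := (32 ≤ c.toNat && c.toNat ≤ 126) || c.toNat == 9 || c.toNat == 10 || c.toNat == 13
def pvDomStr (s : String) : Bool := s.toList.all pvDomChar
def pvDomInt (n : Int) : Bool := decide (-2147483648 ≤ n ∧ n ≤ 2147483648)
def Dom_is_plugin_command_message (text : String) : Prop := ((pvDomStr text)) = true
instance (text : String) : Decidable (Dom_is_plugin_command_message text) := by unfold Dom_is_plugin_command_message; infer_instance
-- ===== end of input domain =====

-- B replaces A's per-command prefix-scan loop by extracting the leading token before the
-- first delimiter and testing set membership (objective: simpler).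

-- ===== PORT A =====
def pvCommands : List String := ["/group_digest", "/group_digest_today", "/group_digest_debug_today"]

-- shared helper: literal port of _strip_leading_mentions (textually identical in Source A and
-- Source B); the while loop runs on fuel = length + 1, which always suffices because every
-- iteration strictly shortens the string.
def pvStripMentionsLoop : Nat → String → String
  | 0, current => current
  | fuel + 1, current =>
    if current = "" then current
    else if PySem.Str.startswith current "[CQ:at" && PySem.Str.isIn "]" current then
      pvStripMentionsLoop fuel
        (PySem.Str.lstrip (((PySem.Str.splitMax? current "]" 1).getD []).getD 1 ""))
    else if PySem.Str.startswith current "@" then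
      let parts := PySem.Str.split₀Max current 1
      if parts.length = 1 then ""
      else pvStripMentionsLoop fuel (PySem.Str.lstrip (parts.getD 1 ""))
    else current

def pvStripMentions (text : String) : String :=
  let current := PySem.Str.lstrip text
  pvStripMentionsLoop (current.length + 1) current

def pvCmdLoop : List String → String → Bool
  | [], _ => false
  | cmd :: rest, n =>
    if n = cmd then true
    else if PySem.Str.startswith n cmd
        && [("" : String), " ", "\n", "\t", "\r", "@"].contains
             (PySem.Str.slice n (some (PySem.Str.len cmd)) (some (PySem.Str.len cmd + 1)))
      then true
    else pvCmdLoop rest n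

def is_plugin_command_message (text : String) : Bool :=
  if text = "" then false
  else
    let normalized := PySem.Str.strip text
    if normalized = "" then false
    else
      let normalized := pvStripMentions normalized
      if normalized = "" then false
      else pvCmdLoop pvCommands normalized

-- ===== PORT B =====
def pvDelims : List Char := [' ', '\t', '\n', '\r', '@']

def pvLeadingToken : List Char → List Char
  | [] => []
  | c :: cs => if pvDelims.contains c then [] else c :: pvLeadingToken cs

def is_plugin_command_message_alt (text : String) : Bool :=
  let normalized := pvStripMentions (PySem.Str.strip text)
  (PySem.Set.ofList pvCommands).contains (String.ofList (pvLeadingToken normalized.toList))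

-- ===== PRECONDITION & SPEC =====
def Spec_is_plugin_command_message (text : String) (out : Bool) : Prop := out = is_plugin_command_message_alt text
instance (text : String) (out : Bool) : Decidable (Spec_is_plugin_command_message text out) := by unfold Spec_is_plugin_command_message; infer_instance

-- ===== CLAIM (what is proved, stated in full; the proofs are below) =====
def Claim_equal_is_plugin_command_message : Prop := ∀ (text : String), Dom_is_plugin_command_message text → Spec_is_plugin_command_message text (is_plugin_command_message text)

-- ===== LEMMAS AND PROOFS =====

-- the boundary condition A demands on the character right after a matched command
def pvDropCond (l : List Char) (k : Nat) : Prop :=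
  ∀ c ∈ (l.drop k).take 1, pvDelims.contains c = true

lemma token_eq_iff (cmd : List Char) (hnd : ∀ c ∈ cmd, pvDelims.contains c = false) :
    ∀ l : List Char, pvLeadingToken l = cmd ↔ cmd <+: l ∧ pvDropCond l cmd.length := by
  induction cmd with
  | nil =>
    intro l
    cases l with
    | nil => simp [pvLeadingToken, pvDropCond]
    | cons c cs =>
      simp only [pvLeadingToken, List.length_nil, List.nil_prefix, true_and, pvDropCond,
        List.drop_zero, List.take_succ_cons, List.take_zero, List.mem_singleton,
        forall_eq]
      by_cases h : pvDelims.contains c = true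
      · simp [h]
      · simp [h]
  | cons a cmd' ih =>
    intro l
    have ha : pvDelims.contains a = false := hnd a (by simp)
    have hnd' : ∀ c ∈ cmd', pvDelims.contains c = false := fun c hc => hnd c (by simp [hc])
    cases l with
    | nil => simp [pvLeadingToken]
    | cons c cs =>
      simp only [pvLeadingToken]
      by_cases h : pvDelims.contains c = true
      · rw [if_pos h]
        constructor
        · intro ht; exact absurd ht (by simp)
        · rintro ⟨hp, -⟩
          rw [List.cons_prefix_cons] at hp
          rw [hp.1, h] at ha
          cases ha
      · rw [if_neg h, List.cons_prefix_cons]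
        constructor
        · intro ht
          injection ht with hca ht'
          obtain ⟨hp, hd⟩ := (ih hnd' cs).mp ht'
          exact ⟨⟨hca.symm, hp⟩, by simpa [pvDropCond] using hd⟩
        · rintro ⟨⟨rfl, hp⟩, hd⟩
          exact congrArg (a :: ·) ((ih hnd' cs).mpr ⟨hp, by simpa [pvDropCond] using hd⟩)

lemma core_step (m l : List Char) (hne : m ≠ []) (hnd : ∀ c ∈ m, pvDelims.contains c = false) :
    (decide (l = m) ||
      (PySem.Chars.startswith l m &&
        [([] : List Char), [' '], ['\n'], ['\t'], ['\r'], ['@']].contains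
          ((l.drop m.length).take 1))) = decide (pvLeadingToken l = m) := by
  rw [Bool.eq_iff_iff]
  simp only [Bool.or_eq_true, Bool.and_eq_true, decide_eq_true_eq, PySem.Chars.startswith_iff,
    token_eq_iff m hnd l, List.contains_eq_mem, List.mem_cons, List.not_mem_nil, or_false]
  constructor
  · rintro (rfl | ⟨hp, hmem⟩)
    · exact ⟨List.prefix_refl _, by simp [pvDropCond]⟩
    · refine ⟨hp, ?_⟩
      intro c hc
      rcases hmem with h | h | h | h | h | h <;> rw [h] at hc <;>
        first
          | (simp only [List.mem_singleton] at hc; subst hc; decide)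
          | simp at hc
  · rintro ⟨hp, hd⟩
    obtain ⟨t, rfl⟩ := hp
    have hdrop : (m ++ t).drop m.length = t := List.drop_left
    cases t with
    | nil => left; simp
    | cons c rest =>
      right
      refine ⟨List.prefix_append _ _, ?_⟩
      have hc : pvDelims.contains c = true := hd c (by rw [hdrop]; simp)
      have hcmem : c ∈ pvDelims := by simpa [List.contains_eq_mem] using hc
      rw [hdrop]
      simp only [List.take_succ_cons, List.take_zero]
      simp only [pvDelims, List.mem_cons, List.not_mem_nil, or_false] at hcmem
      rcases hcmem with rfl | rfl | rfl | rfl | rfl <;> simp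

lemma contains_suffix_bridge (x : String) :
    [("" : String), " ", "\n", "\t", "\r", "@"].contains x =
      ([[], [' '], ['\n'], ['\t'], ['\r'], ['@']] : List (List Char)).contains x.toList := by
  simp only [List.contains_eq_mem, List.mem_cons, List.not_mem_nil, or_false,
    ← String.toList_inj]
  simp

lemma string_step (n cmd : String) (hne : cmd.toList ≠ [])
    (hnd : ∀ c ∈ cmd.toList, pvDelims.contains c = false) :
    (decide (n = cmd) ||
      (PySem.Str.startswith n cmd &&
        [("" : String), " ", "\n", "\t", "\r", "@"].contains
          (PySem.Str.slice n (some (PySem.Str.len cmd)) (some (PySem.Str.len cmd + 1))))) =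
      decide (pvLeadingToken n.toList = cmd.toList) := by
  have e1 : decide (n = cmd) = decide (n.toList = cmd.toList) := by
    simp [String.toList_inj]
  have eslice : (PySem.Str.slice n (some (PySem.Str.len cmd))
      (some (PySem.Str.len cmd + 1))).toList = (n.toList.drop cmd.toList.length).take 1 := by
    rw [PySem.Str.toList_slice, PySem.Chars.slice_eq_listSlice, PySem.Str.len_eq]
    rw [show ((cmd.toList.length : Int) + 1) = ((cmd.toList.length : Int) + ((1 : Nat) : Int)) by
      push_cast; ring]
    exact PySem.List.slice_natCast_add _ _ _
  have e3 : [("" : String), " ", "\n", "\t", "\r", "@"].contains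
      (PySem.Str.slice n (some (PySem.Str.len cmd)) (some (PySem.Str.len cmd + 1))) =
      ([[], [' '], ['\n'], ['\t'], ['\r'], ['@']] : List (List Char)).contains
        ((n.toList.drop cmd.toList.length).take 1) := by
    rw [contains_suffix_bridge, eslice]
  rw [e1, PySem.Str.startswith_eq, e3, core_step cmd.toList n.toList hne hnd]

lemma pvCmdLoop_cons (cmd : String) (rest : List String) (n : String) :
    pvCmdLoop (cmd :: rest) n =
      ((decide (n = cmd) ||
        (PySem.Str.startswith n cmd &&
          [("" : String), " ", "\n", "\t", "\r", "@"].contains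
            (PySem.Str.slice n (some (PySem.Str.len cmd)) (some (PySem.Str.len cmd + 1))))) ||
        pvCmdLoop rest n) := by
  conv_lhs => unfold pvCmdLoop
  split_ifs with h1 hb
  · simp [h1]
  · rw [hb]
    simp
  · simp only [Bool.not_eq_true] at hb
    rw [hb]
    simp only [decide_eq_false h1, Bool.false_or]

lemma set_contains_commands (x : String) :
    (PySem.Set.ofList pvCommands).contains x =
      (decide (x.toList = ("/group_digest" : String).toList) ||
       decide (x.toList = ("/group_digest_today" : String).toList) ||
       decide (x.toList = ("/group_digest_debug_today" : String).toList)) := by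
  rw [Bool.eq_iff_iff]
  simp [PySem.Set.mem_ofList, pvCommands, ← String.toList_inj,
    or_assoc]

lemma toList_cmd1 : ("/group_digest" : String).toList =
    ['/','g','r','o','u','p','_','d','i','g','e','s','t'] := by simp

lemma toList_cmd2 : ("/group_digest_today" : String).toList =
    ['/','g','r','o','u','p','_','d','i','g','e','s','t','_','t','o','d','a','y'] := by simp

lemma toList_cmd3 : ("/group_digest_debug_today" : String).toList =
    ['/','g','r','o','u','p','_','d','i','g','e','s','t','_','d','e','b','u','g','_','t','o','d','a','y'] := by simp

lemma cmdLoop_eq (n : String) :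
    pvCmdLoop pvCommands n =
      (PySem.Set.ofList pvCommands).contains (String.ofList (pvLeadingToken n.toList)) := by
  rw [set_contains_commands, String.toList_ofList]
  conv_lhs => rw [show pvCommands =
    "/group_digest" :: "/group_digest_today" :: "/group_digest_debug_today" :: [] from rfl]
  rw [pvCmdLoop_cons, pvCmdLoop_cons, pvCmdLoop_cons,
    string_step n "/group_digest" (by rw [toList_cmd1]; decide)
      (by rw [toList_cmd1]; intro c hc; fin_cases hc <;> decide),
    string_step n "/group_digest_today" (by rw [toList_cmd2]; decide)
      (by rw [toList_cmd2]; intro c hc; fin_cases hc <;> decide),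
    string_step n "/group_digest_debug_today" (by rw [toList_cmd3]; decide)
      (by rw [toList_cmd3]; intro c hc; fin_cases hc <;> decide)]
  rw [show pvCmdLoop [] n = false from rfl]
  simp only [Bool.or_false, Bool.or_assoc]

-- ===== VERDICT (by name: the statement is the Claim_ definition above) =====
theorem is_plugin_command_message_spec : Claim_equal_is_plugin_command_message := by
  intro text _
  unfold Spec_is_plugin_command_message
  simp only [is_plugin_command_message, is_plugin_command_message_alt]
  by_cases h0 : text = ""
  · subst h0; decide
  · rw [if_neg h0]
    by_cases h1 : PySem.Str.strip text = ""
    · rw [if_pos h1, h1]; decide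
    · rw [if_neg h1]
      by_cases h2 : pvStripMentions (PySem.Str.strip text) = ""
      · rw [if_pos h2, h2]; decide
      · rw [if_neg h2, cmdLoop_eq]
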